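-- pv_equiv track=rewrite | github.com/MichealNestor01/ugly-numbers | my_solution.py | return_symbol_arrangement
-- ===== SOURCE A (Python) =====
-- def return_symbol_arrangement(number, bits):
--     remainder = number % 3
--     if remainder == 0:
--         bits.append("")
--     elif remainder == 1:
--         bits.append("+")
--     else:
--         bits.append("-")
--     integer = number // 3
--     if integer == 0:
--         return [bits[len(bits)-1-i] for i in range(len(bits))]
--     return return_symbol_arrangement(integer, bits)
-- ===== SOURCE B (Python) =====
-- def return_symbol_arrangement(number, bits):
--     SYMBOLS = ("", "+", "-")
--     while True:
--         bits.append(SYMBOLS[number % 3])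
--         number //= 3
--         if number == 0:
--             return bits[::-1]
-- ===== Notes on version B (the rewrite author's own statement) =====
-- stated objective: simpler
-- what changed: Replaced the recursion, the if/elif symbol chain and the reversing index comprehension by a single while loop that appends a symbol looked up in a table and finally returns bits[::-1]; Pre_ excludes number < 0, where A raises RecursionError (number // 3 never reaches 0) and B loops forever.
import Mathlib
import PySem

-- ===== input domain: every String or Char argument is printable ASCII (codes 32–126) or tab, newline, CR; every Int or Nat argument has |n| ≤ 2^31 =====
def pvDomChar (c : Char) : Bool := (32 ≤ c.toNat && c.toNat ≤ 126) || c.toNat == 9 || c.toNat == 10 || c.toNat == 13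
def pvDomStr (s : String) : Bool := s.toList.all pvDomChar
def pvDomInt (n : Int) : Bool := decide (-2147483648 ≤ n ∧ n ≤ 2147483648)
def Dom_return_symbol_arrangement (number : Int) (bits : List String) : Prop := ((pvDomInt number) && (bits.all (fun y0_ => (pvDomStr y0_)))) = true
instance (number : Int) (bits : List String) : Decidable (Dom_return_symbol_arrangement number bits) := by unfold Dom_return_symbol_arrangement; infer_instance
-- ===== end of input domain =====

-- B replaces A's recursion + if/elif symbol chain + index comprehension by a while loop with a
-- symbol-table lookup and a [::-1] slice (objective: simpler). Both A and B append to the caller's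
-- `bits` list in place identically; the theorems below are about the return value.

-- ===== PORT A =====
-- termination measure lemma cited by both ports' decreasing_by (Python diverges when number < 0)
theorem pvFloordivLt (n : Int) (hne : ¬ PySem.Int.floordiv n 3 = 0) (hnn : 0 ≤ n) :
    (PySem.Int.floordiv n 3).toNat < n.toNat := by
  rw [PySem.Int.floordiv_eq_ediv_of_pos (by norm_num : (0:Int) < 3)] at hne ⊢
  omega

-- Literal port of A's recursion. For number < 0 Python recurses forever (RecursionError:
-- integer never reaches 0), so that branch is a totality guard outside Pre_.
def return_symbol_arrangement (number : Int) (bits : List String) : List String :=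
  let remainder := PySem.Int.mod number 3
  let bits' := if remainder = 0 then bits ++ [""]
               else if remainder = 1 then bits ++ ["+"]
               else bits ++ ["-"]
  if PySem.Int.floordiv number 3 = 0 then
    -- [bits[len(bits)-1-i] for i in range(len(bits))]; index always in range, so pyGetD is exact
    (List.range bits'.length).map (fun (i : Nat) => PySem.List.pyGetD bits' ((bits'.length : Int) - 1 - (i : Int)) "")
  else if 0 ≤ number then return_symbol_arrangement (PySem.Int.floordiv number 3) bits'
  else []  -- unreachable under Pre_ (Python diverges here)
termination_by number.toNat
decreasing_by
  rename_i hne hnn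
  exact pvFloordivLt number hne hnn

-- ===== PORT B =====
-- the while-loop body of Source B: append SYMBOLS[number % 3], number //= 3, stop when 0
def pvAltLoop (number : Int) (bits : List String) : List String :=
  let bits' := bits ++ [PySem.List.pyGetD ["", "+", "-"] (PySem.Int.mod number 3) ""]
  if PySem.Int.floordiv number 3 = 0 then bits'
  else if 0 ≤ number then pvAltLoop (PySem.Int.floordiv number 3) bits'
  else []  -- unreachable under Pre_ (the Python loop never terminates here)
termination_by number.toNat
decreasing_by
  rename_i hne hnn
  exact pvFloordivLt number hne hnn

def return_symbol_arrangement_alt (number : Int) (bits : List String) : List String :=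
  (PySem.List.slice? (pvAltLoop number bits) none none (-1)).getD []  -- bits[::-1]; step -1 ≠ 0, exact

-- ===== PRECONDITION & SPEC =====
-- Pre_ excludes number < 0, on which Python A raises RecursionError (number // 3 never reaches 0).
def Pre_return_symbol_arrangement (number : Int) (bits : List String) : Prop := 0 ≤ number
instance (number : Int) (bits : List String) : Decidable (Pre_return_symbol_arrangement number bits) := by unfold Pre_return_symbol_arrangement; infer_instance
def pvWitness_return_symbol_arrangement : Int × List String := (11, ["x"])
def Spec_return_symbol_arrangement (number : Int) (bits : List String) (out : List String) : Prop := out = return_symbol_arrangement_alt number bits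
instance (number : Int) (bits : List String) (out : List String) : Decidable (Spec_return_symbol_arrangement number bits out) := by unfold Spec_return_symbol_arrangement; infer_instance

-- ===== CLAIM (what is proved, stated in full; the proofs are below) =====
def Claim_equal_return_symbol_arrangement : Prop := ∀ (number : Int) (bits : List String), Dom_return_symbol_arrangement number bits → Pre_return_symbol_arrangement number bits → Spec_return_symbol_arrangement number bits (return_symbol_arrangement number bits)

-- ===== LEMMAS AND PROOFS =====

-- A's index comprehension is list reversal
theorem pvCompRev (l : List String) :
    (List.range l.length).map (fun (i : Nat) => PySem.List.pyGetD l ((l.length : Int) - 1 - (i : Int)) "") = l.reverse := by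
  apply List.ext_getElem
  · simp
  · intro i h1 h2
    have hi : i < l.length := by simpa using h1
    simp only [List.getElem_map, List.getElem_range, List.getElem_reverse]
    have hidx : (l.length : Int) - 1 - (i : Int) = ((l.length - 1 - i : Nat) : Int) := by omega
    rw [hidx, PySem.List.pyGetD_natCast, List.getD_eq_getElem?_getD,
        List.getElem?_eq_getElem (by omega)]
    rfl

-- A's if/elif chain appends the same symbol as B's table lookup
theorem pvSymEq (number : Int) (bits : List String) :
    (if PySem.Int.mod number 3 = 0 then bits ++ [""]
     else if PySem.Int.mod number 3 = 1 then bits ++ ["+"]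
     else bits ++ ["-"])
    = bits ++ [PySem.List.pyGetD ["", "+", "-"] (PySem.Int.mod number 3) ""] := by
  have h0 : 0 ≤ PySem.Int.mod number 3 := PySem.Int.mod_nonneg number (by norm_num)
  have h3 : PySem.Int.mod number 3 < 3 := PySem.Int.mod_lt number (by norm_num)
  have : PySem.Int.mod number 3 = 0 ∨ PySem.Int.mod number 3 = 1 ∨ PySem.Int.mod number 3 = 2 := by omega
  rcases this with hm | hm | hm <;> rw [hm] <;> norm_num <;> decide

theorem pvMain (number : Int) (bits : List String) (h : 0 ≤ number) :
    return_symbol_arrangement number bits = (pvAltLoop number bits).reverse := by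
  rw [return_symbol_arrangement.eq_def, pvAltLoop.eq_def]
  simp only [pvSymEq number bits]
  split
  · exact pvCompRev _
  all_goals
    exact pvMain _ _ (by
      rw [PySem.Int.floordiv_eq_ediv_of_pos (by norm_num : (0:Int) < 3)]; omega)
termination_by number.toNat
decreasing_by
  all_goals
    simp only [PySem.Int.floordiv_eq_ediv_of_pos (by norm_num : (0:Int) < 3)] at *
    omega

-- ===== VERDICT (by name: the statement is the Claim_ definition above) =====
theorem return_symbol_arrangement_spec : Claim_equal_return_symbol_arrangement := by
  intro number bits _ hpre
  unfold Spec_return_symbol_arrangement return_symbol_arrangement_alt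
  rw [PySem.List.slice?_none_none_neg_one, Option.getD_some]
  exact pvMain number bits hpre
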